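-- pv_equiv track=rewrite | github.com/IlyaVolvo/google-1gram | hy/description_utils.py | filter_bullets
-- ===== SOURCE A (Python) =====
-- from typing import Iterable, List, Optional, Union
--
-- def filter_bullets(
--     bullets: Iterable[str],
--     filter_words: Iterable[str],
-- ) -> List[str]:
--     """
--     Remove bullets that contain any of the filter_words as substrings.
--     Matching is case-sensitive and simple substring.
--     """
--     bullets = list(bullets)
--     if not bullets:
--         return []
--
--     fw = list(filter_words)
--     if not fw:
--         return bullets
--
--     kept: List[str] = []
--     for b in bullets:
--         if any(w in b for w in fw):
--             continue
--         kept.append(b)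
--     return kept
-- ===== SOURCE B (Python) =====
-- from typing import Iterable, List
--
--
-- def filter_bullets(
--     bullets: Iterable[str],
--     filter_words: Iterable[str],
-- ) -> List[str]:
--     # Word-major: each filter word makes one elimination pass over the
--     # survivors, instead of A's bullet-major pass with an inner any().
--     kept = list(bullets)
--     for w in filter_words:
--         kept = [b for b in kept if w not in b]
--     return kept
-- ===== Notes on version B (the rewrite author's own statement) =====
-- stated objective: alternative
-- what changed: Inverts the loop nesting: instead of A's bullet-major pass with an inner any() over the words (plus empty-input short-circuits), B makes one elimination pass over the surviving bullets per filter word, rebuilding the survivor list word by word.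
import Mathlib
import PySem

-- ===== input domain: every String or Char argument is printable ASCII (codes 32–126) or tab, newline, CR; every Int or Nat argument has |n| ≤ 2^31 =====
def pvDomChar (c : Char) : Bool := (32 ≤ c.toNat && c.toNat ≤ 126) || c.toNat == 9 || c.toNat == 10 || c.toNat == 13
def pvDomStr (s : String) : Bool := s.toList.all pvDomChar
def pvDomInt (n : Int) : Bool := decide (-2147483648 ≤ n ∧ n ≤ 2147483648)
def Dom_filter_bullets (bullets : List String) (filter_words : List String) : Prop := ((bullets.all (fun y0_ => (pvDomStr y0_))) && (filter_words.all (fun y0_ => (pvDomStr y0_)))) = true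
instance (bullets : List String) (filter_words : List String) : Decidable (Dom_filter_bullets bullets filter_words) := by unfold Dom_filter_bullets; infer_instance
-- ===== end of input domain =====

-- B inverts the loop nesting: one elimination pass over the survivors per filter word; alternative structure, same exact result.
-- ===== PORT A =====
def filter_bullets (bullets : List String) (filter_words : List String) : List String :=
  if bullets = [] then []
  else if filter_words = [] then bullets
  else bullets.foldl (fun kept b =>
    if filter_words.any (fun w => PySem.Str.isIn w b) then kept
    else kept ++ [b]) []

-- ===== PORT B =====
def filter_bullets_alt (bullets : List String) (filter_words : List String) : List String :=
  filter_words.foldl (fun kept w => kept.filter (fun b => !PySem.Str.isIn w b)) bullets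

-- ===== PRECONDITION & SPEC =====
def Spec_filter_bullets (bullets : List String) (filter_words : List String) (out : List String) : Prop := out = filter_bullets_alt bullets filter_words
instance (bullets : List String) (filter_words : List String) (out : List String) : Decidable (Spec_filter_bullets bullets filter_words out) := by unfold Spec_filter_bullets; infer_instance

-- ===== CLAIM (what is proved, stated in full; the proofs are below) =====
def Claim_equal_filter_bullets : Prop := ∀ (bullets : List String) (filter_words : List String), Dom_filter_bullets bullets filter_words → Spec_filter_bullets bullets filter_words (filter_bullets bullets filter_words)

-- ===== LEMMAS AND PROOFS =====

-- word-major elimination passes compute the same survivors as one pass with an inner any()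
lemma foldl_filter_eq (fw : List String) (acc : List String) :
    fw.foldl (fun kept w => kept.filter (fun b => !PySem.Str.isIn w b)) acc
      = acc.filter (fun b => !fw.any (fun w => PySem.Str.isIn w b)) := by
  induction fw generalizing acc with
  | nil => simp
  | cons w ws ih =>
    rw [List.foldl_cons, ih, List.filter_filter]
    simp [Bool.and_comm]

lemma foldl_keep {α : Type} (p : α → Bool) (l : List α) (acc : List α) :
    l.foldl (fun k x => if p x then k else k ++ [x]) acc
      = acc ++ l.filter (fun x => !p x) := by
  induction l generalizing acc with
  | nil => simp
  | cons x xs ih =>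
    by_cases h : p x = true <;> simp [List.foldl_cons, h, ih]

-- ===== VERDICT (by name: the statement is the Claim_ definition above) =====
theorem filter_bullets_spec : Claim_equal_filter_bullets := by
  intro bullets fw _
  unfold Spec_filter_bullets filter_bullets filter_bullets_alt
  rw [foldl_filter_eq]
  by_cases hb : bullets = []
  · simp [hb]
  · by_cases hf : fw = []
    · simp [hb, hf]
    · rw [if_neg hb, if_neg hf, foldl_keep]
      simp
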